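-- pv_equiv track=rewrite | github.com/alpinx/django_JenkinsQueue | example/main.py | makeBuildsForAllVms
-- ===== SOURCE A (Python) =====
-- from operator import itemgetter
--
-- def makeBuildsForAllVms(runningqueue):
--     runningqueue = sorted(runningqueue, key=itemgetter('vm'))
--     all_vm = []
--     for i in range(2, 12):
--         all_vm.append({
--             "srprofile": "",
--             "testname": "",
--             "vm": "vm0" + str(i) if i < 10 else "vm" + str(i),
--             "env": "",
--             "duration": ""
--         })
--         all_vm.append({
--             "srprofile": "",
--             "testname": "",
--             "vm": "vm0" + str(i) + '-1' if i < 10 else "vm" + str(i) + '-1',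
--             "env": "",
--             "duration": ""
--         })
--         all_vm.append({
--             "srprofile": "",
--             "testname": "",
--             "vm": "vm0" + str(i) + '-2' if i < 10 else "vm" + str(i) + '-2',
--             "env": "",
--             "duration": ""
--         })
--         all_vm.append({
--             "srprofile": "",
--             "testname": "",
--             "vm": "vm0" + str(i) + '-3' if i < 10 else "vm" + str(i) + '-3',
--             "env": "",
--             "duration": ""
--         })
--
--     for count, item in enumerate([d["vm"] for d in runningqueue]):
--         for i, d in enumerate(all_vm):
--             if item == d["vm"]:
--                 all_vm[i]["srprofile"] = runningqueue[count]["srprofile"]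
--                 all_vm[i]["testname"] = runningqueue[count]["testname"]
--                 all_vm[i]["env"] = runningqueue[count]["env"]
--                 all_vm[i]["duration"] = runningqueue[count]["duration"]
--     return all_vm
-- ===== SOURCE B (Python) =====
-- from operator import itemgetter
--
-- def _fill_slot(by_vm, name):
--     item = by_vm.get(name)
--     if item is None:
--         return {"srprofile": "", "testname": "", "vm": name, "env": "", "duration": ""}
--     return {
--         "srprofile": item["srprofile"],
--         "testname": item["testname"],
--         "vm": name,
--         "env": item["env"],
--         "duration": item["duration"],
--     }
--
-- def makeBuildsForAllVms(runningqueue):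
--     by_vm = {}
--     for item in sorted(runningqueue, key=itemgetter('vm')):
--         by_vm[item['vm']] = item
--     all_vm = []
--     for i in range(2, 12):
--         base = "vm0" + str(i) if i < 10 else "vm" + str(i)
--         for suf in ["", "-1", "-2", "-3"]:
--             all_vm.append(_fill_slot(by_vm, base + suf))
--     return all_vm
-- ===== Notes on version B (the rewrite author's own statement) =====
-- stated objective: simpler
-- what changed: B builds one dict mapping vm -> queue item over the sorted queue (later duplicates overwrite, preserving A's last-wins-in-sorted-order) and then constructs each of the 40 fixed slots directly with a single lookup, replacing A's mutate-in-place double loop (scan of all 40 slots per queue item).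
import Mathlib
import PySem

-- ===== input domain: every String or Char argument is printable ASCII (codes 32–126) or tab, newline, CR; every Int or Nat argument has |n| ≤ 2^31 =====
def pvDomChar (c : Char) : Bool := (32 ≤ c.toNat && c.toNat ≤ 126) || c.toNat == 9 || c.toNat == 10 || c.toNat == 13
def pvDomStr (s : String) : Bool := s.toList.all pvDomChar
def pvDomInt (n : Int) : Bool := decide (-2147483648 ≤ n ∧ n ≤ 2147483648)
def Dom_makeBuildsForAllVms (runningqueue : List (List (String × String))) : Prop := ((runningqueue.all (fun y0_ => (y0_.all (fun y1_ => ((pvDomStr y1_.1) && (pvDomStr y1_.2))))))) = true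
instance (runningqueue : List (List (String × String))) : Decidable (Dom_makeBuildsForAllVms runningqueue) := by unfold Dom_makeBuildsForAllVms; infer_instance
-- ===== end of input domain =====

-- B replaces A's mutate-in-place double loop (scan all 40 fixed slots per queue item) by one
-- vm->item dict built over the sorted queue plus a direct single-pass construction of the 40 slots (simpler).

-- d[k] for a Python dict given as an association list; used only where Pre_ guarantees the key is present
def pvGetS (d : List (String × String)) (k : String) : String :=
  (PySem.Dict.mk d).getD k ""

-- ===== PORT A =====
def makeBuildsForAllVms (runningqueue : List (List (String × String))) : List (List (String × String)) :=
  let q := PySem.List.sorted runningqueue (key := fun d => pvGetS d "vm")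
  let all_vm : List (PySem.Dict String String) :=
    (PySem.List.pyRange 2 12 1).foldl (fun acc i =>
      ((((acc ++ [PySem.Dict.mk [("srprofile", ""), ("testname", ""),
            ("vm", if i < 10 then "vm0" ++ PySem.Int.toStr i else "vm" ++ PySem.Int.toStr i),
            ("env", ""), ("duration", "")]])
        ++ [PySem.Dict.mk [("srprofile", ""), ("testname", ""),
            ("vm", if i < 10 then "vm0" ++ PySem.Int.toStr i ++ "-1" else "vm" ++ PySem.Int.toStr i ++ "-1"),
            ("env", ""), ("duration", "")]])
        ++ [PySem.Dict.mk [("srprofile", ""), ("testname", ""),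
            ("vm", if i < 10 then "vm0" ++ PySem.Int.toStr i ++ "-2" else "vm" ++ PySem.Int.toStr i ++ "-2"),
            ("env", ""), ("duration", "")]])
        ++ [PySem.Dict.mk [("srprofile", ""), ("testname", ""),
            ("vm", if i < 10 then "vm0" ++ PySem.Int.toStr i ++ "-3" else "vm" ++ PySem.Int.toStr i ++ "-3"),
            ("env", ""), ("duration", "")]])) []
  -- for count, item in enumerate([d["vm"] for d in runningqueue]): for i, d in enumerate(all_vm): if item == d["vm"]: …
  let all_vm := q.foldl (fun av item =>
      av.map (fun d =>
        if pvGetS item "vm" == d.getD "vm" "" then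
          (((d.insert "srprofile" (pvGetS item "srprofile")).insert "testname" (pvGetS item "testname")).insert
              "env" (pvGetS item "env")).insert "duration" (pvGetS item "duration")
        else d)) all_vm
  all_vm.map PySem.Dict.items

-- ===== PORT B =====
def pvFillSlot (byVm : PySem.Dict String (List (String × String))) (name : String) : List (String × String) :=
  match byVm.get? name with
  | none => [("srprofile", ""), ("testname", ""), ("vm", name), ("env", ""), ("duration", "")]
  | some item => [("srprofile", pvGetS item "srprofile"), ("testname", pvGetS item "testname"),
                  ("vm", name), ("env", pvGetS item "env"), ("duration", pvGetS item "duration")]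

def makeBuildsForAllVms_alt (runningqueue : List (List (String × String))) : List (List (String × String)) :=
  let q := PySem.List.sorted runningqueue (key := fun d => pvGetS d "vm")
  let byVm := q.foldl (fun m item => m.insert (pvGetS item "vm") item) PySem.Dict.empty
  (PySem.List.pyRange 2 12 1).foldl (fun acc i =>
    let base := if i < 10 then "vm0" ++ PySem.Int.toStr i else "vm" ++ PySem.Int.toStr i
    (["", "-1", "-2", "-3"] : List String).foldl (fun acc2 suf => acc2 ++ [pvFillSlot byVm (base ++ suf)]) acc) []

-- ===== PRECONDITION & SPEC =====
-- the 40 fixed vm slot names (used only by Pre_)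
def pvSlotNames : List String :=
  ["vm02", "vm02-1", "vm02-2", "vm02-3", "vm03", "vm03-1", "vm03-2", "vm03-3",
   "vm04", "vm04-1", "vm04-2", "vm04-3", "vm05", "vm05-1", "vm05-2", "vm05-3",
   "vm06", "vm06-1", "vm06-2", "vm06-3", "vm07", "vm07-1", "vm07-2", "vm07-3",
   "vm08", "vm08-1", "vm08-2", "vm08-3", "vm09", "vm09-1", "vm09-2", "vm09-3",
   "vm10", "vm10-1", "vm10-2", "vm10-3", "vm11", "vm11-1", "vm11-2", "vm11-3"]

-- Pre_ excludes exactly the inputs where Python A raises KeyError: an item without key "vm"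
-- (read by itemgetter('vm') in sorted), or an item whose vm equals one of the 40 fixed slot
-- names but lacks one of the four keys copied in the update loop.
def Pre_makeBuildsForAllVms (runningqueue : List (List (String × String))) : Prop :=
  ∀ d ∈ runningqueue, (PySem.Dict.mk d).contains "vm" = true ∧
    ((PySem.Dict.mk d).getD "vm" "" ∈ pvSlotNames →
      (PySem.Dict.mk d).contains "srprofile" = true ∧ (PySem.Dict.mk d).contains "testname" = true ∧
      (PySem.Dict.mk d).contains "env" = true ∧ (PySem.Dict.mk d).contains "duration" = true)
instance (runningqueue : List (List (String × String))) : Decidable (Pre_makeBuildsForAllVms runningqueue) := by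
  unfold Pre_makeBuildsForAllVms; infer_instance

def pvWitness_makeBuildsForAllVms : (List (List (String × String))) :=
  [[("vm", "vm03"), ("srprofile", "p"), ("testname", "t"), ("env", "e"), ("duration", "7")],
   [("vm", "other")]]

def Spec_makeBuildsForAllVms (runningqueue : List (List (String × String))) (out : List (List (String × String))) : Prop := out = makeBuildsForAllVms_alt runningqueue
instance (runningqueue : List (List (String × String))) (out : List (List (String × String))) : Decidable (Spec_makeBuildsForAllVms runningqueue out) := by unfold Spec_makeBuildsForAllVms; infer_instance

-- ===== CLAIM (what is proved, stated in full; the proofs are below) =====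
def Claim_equal_makeBuildsForAllVms : Prop := ∀ (runningqueue : List (List (String × String))), Dom_makeBuildsForAllVms runningqueue → Pre_makeBuildsForAllVms runningqueue → Spec_makeBuildsForAllVms runningqueue (makeBuildsForAllVms runningqueue)

-- ===== LEMMAS AND PROOFS =====
def pvSlot (v a b c d : String) : PySem.Dict String String :=
  PySem.Dict.mk [("srprofile",a),("testname",b),("vm",v),("env",c),("duration",d)]
def pvUpd (item : List (String×String)) (d : PySem.Dict String String) : PySem.Dict String String :=
  (((d.insert "srprofile" (pvGetS item "srprofile")).insert "testname" (pvGetS item "testname")).insert "env" (pvGetS item "env")).insert "duration" (pvGetS item "duration")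

def pvLast (q : List (List (String × String))) (v : String) : Option (List (String × String)) :=
  q.foldl (fun acc it => if pvGetS it "vm" == v then some it else acc) none

theorem pvSlot_getD_vm (v a b c d : String) : (pvSlot v a b c d).getD "vm" "" = v := by
  simp [pvSlot, pysem]

theorem pvUpd_pvSlot (it : List (String × String)) (v a b c d : String) :
    pvUpd it (pvSlot v a b c d) = pvSlot v (pvGetS it "srprofile") (pvGetS it "testname") (pvGetS it "env") (pvGetS it "duration") := by
  simp [pvUpd, pvSlot, PySem.Dict.insert, PySem.Dict.contains]

theorem pv_last_some (v : String) :
    ∀ (q : List (List (String × String))) (x : List (String × String)),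
      q.foldl (fun acc it => if pvGetS it "vm" == v then some it else acc) (some x)
        = some ((pvLast q v).getD x) := by
  intro q
  induction q with
  | nil => intro x; simp [pvLast]
  | cons it q ih =>
    intro x
    simp only [List.foldl_cons]
    by_cases h : (pvGetS it "vm" == v) = true
    · have hlast : pvLast (it :: q) v = some ((pvLast q v).getD it) := by
        unfold pvLast; rw [List.foldl_cons, if_pos h]; exact ih it
      rw [if_pos h, ih it, hlast]
      rfl
    · have hlast : pvLast (it :: q) v = pvLast q v := by
        unfold pvLast; rw [List.foldl_cons, if_neg h]
      rw [if_neg h, ih x, hlast]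

theorem pv_slotFold (q : List (List (String × String))) :
    ∀ (v a b c d : String),
      q.foldl (fun dd it => if pvGetS it "vm" == dd.getD "vm" "" then pvUpd it dd else dd) (pvSlot v a b c d)
      = match pvLast q v with
        | none => pvSlot v a b c d
        | some it => pvSlot v (pvGetS it "srprofile") (pvGetS it "testname") (pvGetS it "env") (pvGetS it "duration") := by
  induction q with
  | nil => intro v a b c d; simp [pvLast]
  | cons it q ih =>
    intro v a b c d
    simp only [List.foldl_cons, pvSlot_getD_vm]
    by_cases h : (pvGetS it "vm" == v) = true
    · have hlast : pvLast (it :: q) v = some ((pvLast q v).getD it) := by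
        unfold pvLast; rw [List.foldl_cons, if_pos h]; exact pv_last_some v q it
      rw [if_pos h, pvUpd_pvSlot, ih, hlast]
      cases hq : pvLast q v <;> rfl
    · have hlast : pvLast (it :: q) v = pvLast q v := by
        unfold pvLast; rw [List.foldl_cons, if_neg h]
      rw [if_neg h, ih, hlast]

theorem pv_dictFold_get? (q : List (List (String × String))) :
    ∀ (m : PySem.Dict String (List (String × String))) (v : String),
      (q.foldl (fun m it => m.insert (pvGetS it "vm") it) m).get? v
      = match pvLast q v with
        | none => m.get? v
        | some it => some it := by
  induction q with
  | nil => intro m v; simp [pvLast]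
  | cons it q ih =>
    intro m v
    simp only [List.foldl_cons]
    rw [ih]
    by_cases h : (pvGetS it "vm" == v) = true
    · have hv : pvGetS it "vm" = v := beq_iff_eq.mp h
      have hlast : pvLast (it :: q) v = some ((pvLast q v).getD it) := by
        unfold pvLast; rw [List.foldl_cons, if_pos h]; exact pv_last_some v q it
      rw [hlast, hv]
      cases hq : pvLast q v
      · simp [PySem.Dict.get?_insert_self]
      · rfl
    · have hv : v ≠ pvGetS it "vm" := fun he => h (beq_iff_eq.mpr he.symm)
      have hlast : pvLast (it :: q) v = pvLast q v := by
        unfold pvLast; rw [List.foldl_cons, if_neg h]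
      rw [hlast]
      cases hq : pvLast q v
      · exact PySem.Dict.get?_insert_of_ne _ _ hv
      · rfl

theorem pv_fill_bridge (q : List (List (String × String))) (v : String) :
    (q.foldl (fun dd it => if pvGetS it "vm" == dd.getD "vm" "" then pvUpd it dd else dd) (pvSlot v "" "" "" "")).items
    = pvFillSlot (q.foldl (fun m it => m.insert (pvGetS it "vm") it) PySem.Dict.empty) v := by
  rw [pv_slotFold]
  unfold pvFillSlot
  rw [pv_dictFold_get?]
  cases hq : pvLast q v <;> simp [pvSlot]

theorem pv_foldl_map_comm (q : List (List (String × String))) :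
    ∀ (l : List (PySem.Dict String String)),
      q.foldl (fun av item =>
          av.map (fun d => if pvGetS item "vm" == d.getD "vm" "" then pvUpd item d else d)) l
      = l.map (fun d =>
          q.foldl (fun dd it => if pvGetS it "vm" == dd.getD "vm" "" then pvUpd it dd else dd) d) := by
  induction q with
  | nil => intro l; simp
  | cons it q ih =>
    intro l
    simp only [List.foldl_cons, ih, List.map_map]
    rfl

theorem pv_buildComm (G : String → List (String × String))
    (F : PySem.Dict String String → List (String × String))
    (hF : ∀ v, F (pvSlot v "" "" "" "") = G v) :
    ∀ (r : List Int) (acc : List (PySem.Dict String String)),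
      (r.foldl (fun acc i =>
        ((((acc ++ [pvSlot (if i < 10 then "vm0" ++ PySem.Int.toStr i else "vm" ++ PySem.Int.toStr i) "" "" "" ""])
           ++ [pvSlot (if i < 10 then "vm0" ++ PySem.Int.toStr i ++ "-1" else "vm" ++ PySem.Int.toStr i ++ "-1") "" "" "" ""])
           ++ [pvSlot (if i < 10 then "vm0" ++ PySem.Int.toStr i ++ "-2" else "vm" ++ PySem.Int.toStr i ++ "-2") "" "" "" ""])
           ++ [pvSlot (if i < 10 then "vm0" ++ PySem.Int.toStr i ++ "-3" else "vm" ++ PySem.Int.toStr i ++ "-3") "" "" "" ""])) acc).map F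
      = r.foldl (fun acc2 i =>
          let base := if i < 10 then "vm0" ++ PySem.Int.toStr i else "vm" ++ PySem.Int.toStr i
          (["", "-1", "-2", "-3"] : List String).foldl (fun a suf => a ++ [G (base ++ suf)]) acc2) (acc.map F) := by
  intro r
  induction r with
  | nil => intro acc; simp
  | cons i r ih =>
    intro acc
    simp only [List.foldl_cons, ih, List.map_append, List.map_cons, List.map_nil, hF]
    by_cases h : i < 10 <;> simp [h, String.append_empty]


-- ===== VERDICT (by name: the statement is the Claim_ definition above) =====
theorem makeBuildsForAllVms_spec : Claim_equal_makeBuildsForAllVms := by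
  intro rq _ _
  unfold Spec_makeBuildsForAllVms

  simp only [makeBuildsForAllVms, makeBuildsForAllVms_alt]
  rw [show (fun (av : List (PySem.Dict String String)) (item : List (String × String)) =>
        av.map (fun d =>
          if pvGetS item "vm" == d.getD "vm" "" then
            (((d.insert "srprofile" (pvGetS item "srprofile")).insert "testname" (pvGetS item "testname")).insert
                "env" (pvGetS item "env")).insert "duration" (pvGetS item "duration")
          else d))
      = (fun (av : List (PySem.Dict String String)) (item : List (String × String)) =>
          av.map (fun d => if pvGetS item "vm" == d.getD "vm" "" then pvUpd item d else d)) from rfl]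
  rw [pv_foldl_map_comm, List.map_map]
  exact pv_buildComm _ _ (fun v => pv_fill_bridge _ v) _ []
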